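-- pv_equiv track=rewrite | github.com/IlGiorg/Giorgio-learns-code | DP_Timetable2/version5/scheduler.py | validate_student
-- ===== SOURCE A (Python) =====
-- SCIENCES = {'Computer Science', 'Physics', 'Biology', 'Chemistry', 'Environmental Sciences Studies (ESS)'}
--
-- HUMANITIES = {'Economics', 'Business', 'Global Politics', 'History', 'Geography', 'Politics', 'GeoPolitics'}
--
-- ARTS = {'Arts', 'Music', 'Visual Arts'}
--
-- LANGUAGES = {'Spanish', 'French'}
--
-- ONLINE = {'Psychology (Timetabled Online)'}
--
-- def get_category(subject):
--     if subject in SCIENCES: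
--         return 'Science'
--     elif subject in HUMANITIES:
--         return 'Humanity'
--     elif subject in ARTS:
--         return 'Arts'
--     elif subject in LANGUAGES:
--         return 'Language'
--     elif subject in ONLINE:
--         return 'Online'
--     return 'Unknown'
--
-- def validate_student(subjects):
--     science_count = sum(1 for s in subjects if get_category(s) == 'Science')
--     humanity_count = sum(1 for s in subjects if get_category(s) == 'Humanity')
--     flexible = sum(1 for s in subjects if get_category(s) in ['Language', 'Arts'])
--     humanity_count += flexible
--
--     valid = (science_count == 2 and humanity_count == 1) or \
--             (science_count == 1 and humanity_count == 2)
--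
--     return valid, science_count, humanity_count
-- ===== SOURCE B (Python) =====
-- SCIENCES = {'Computer Science', 'Physics', 'Biology', 'Chemistry', 'Environmental Sciences Studies (ESS)'}
--
-- HUMANITIES = {'Economics', 'Business', 'Global Politics', 'History', 'Geography', 'Politics', 'GeoPolitics'}
--
-- ARTS = {'Arts', 'Music', 'Visual Arts'}
--
-- LANGUAGES = {'Spanish', 'French'}
--
-- ONLINE = {'Psychology (Timetabled Online)'}
--
-- def get_category(subject):
--     if subject in SCIENCES:
--         return 'Science'
--     elif subject in HUMANITIES:
--         return 'Humanity'
--     elif subject in ARTS: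
--         return 'Arts'
--     elif subject in LANGUAGES:
--         return 'Language'
--     elif subject in ONLINE:
--         return 'Online'
--     return 'Unknown'
--
-- def validate_student(subjects):
--     science_count = 0
--     humanity_count = 0
--     for s in subjects:
--         c = get_category(s)
--         if c == 'Science':
--             science_count += 1
--         elif c in ('Humanity', 'Language', 'Arts'):
--             humanity_count += 1
--     valid = (science_count == 2 and humanity_count == 1) or \
--             (science_count == 1 and humanity_count == 2)
--     return valid, science_count, humanity_count
-- ===== Notes on version B (the rewrite author's own statement) =====
-- stated objective: faster
-- what changed: Replaced three separate comprehension passes over subjects (each calling get_category per element) with a single loop maintaining both counters, calling get_category once per subject.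
import Mathlib
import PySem

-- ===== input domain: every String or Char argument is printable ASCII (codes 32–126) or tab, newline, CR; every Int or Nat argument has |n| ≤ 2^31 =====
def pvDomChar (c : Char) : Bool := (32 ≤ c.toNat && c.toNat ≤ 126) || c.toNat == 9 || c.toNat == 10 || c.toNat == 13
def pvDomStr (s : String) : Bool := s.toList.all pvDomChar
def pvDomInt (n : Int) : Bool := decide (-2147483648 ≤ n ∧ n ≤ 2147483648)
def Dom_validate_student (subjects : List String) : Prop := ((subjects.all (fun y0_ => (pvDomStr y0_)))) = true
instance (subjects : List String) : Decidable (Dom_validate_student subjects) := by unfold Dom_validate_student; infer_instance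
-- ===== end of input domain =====

-- B replaces A's three separate counting passes (each calling get_category per element)
-- with one loop that calls get_category once per subject; objective: faster (constant factor).

-- ===== PORT A =====
def pvSCIENCES : List String := ["Computer Science", "Physics", "Biology", "Chemistry", "Environmental Sciences Studies (ESS)"]
def pvHUMANITIES : List String := ["Economics", "Business", "Global Politics", "History", "Geography", "Politics", "GeoPolitics"]
def pvARTS : List String := ["Arts", "Music", "Visual Arts"]
def pvLANGUAGES : List String := ["Spanish", "French"]
def pvONLINE : List String := ["Psychology (Timetabled Online)"]

def get_category (subject : String) : String :=
  if pvSCIENCES.contains subject then "Science"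
  else if pvHUMANITIES.contains subject then "Humanity"
  else if pvARTS.contains subject then "Arts"
  else if pvLANGUAGES.contains subject then "Language"
  else if pvONLINE.contains subject then "Online"
  else "Unknown"

def validate_student (subjects : List String) : Bool × Int × Int :=
  let science_count : Int :=
    subjects.foldl (fun acc s => if get_category s == "Science" then acc + 1 else acc) 0
  let humanity_count : Int :=
    subjects.foldl (fun acc s => if get_category s == "Humanity" then acc + 1 else acc) 0
  let flexible : Int :=
    subjects.foldl (fun acc s => if (["Language", "Arts"] : List String).contains (get_category s) then acc + 1 else acc) 0
  let humanity_count := humanity_count + flexible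
  let valid := (science_count == 2 && humanity_count == 1) || (science_count == 1 && humanity_count == 2)
  (valid, science_count, humanity_count)

-- ===== PORT B =====
-- B's single loop over the subjects, carrying both counters.
def vsLoop : List String → Int → Int → Int × Int
  | [], science_count, humanity_count => (science_count, humanity_count)
  | s :: rest, science_count, humanity_count =>
    let c := get_category s
    if c == "Science" then vsLoop rest (science_count + 1) humanity_count
    else if (["Humanity", "Language", "Arts"] : List String).contains c then
      vsLoop rest science_count (humanity_count + 1)
    else vsLoop rest science_count humanity_count

def validate_student_alt (subjects : List String) : Bool × Int × Int :=
  let counts := vsLoop subjects 0 0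
  let science_count := counts.1
  let humanity_count := counts.2
  let valid := (science_count == 2 && humanity_count == 1) || (science_count == 1 && humanity_count == 2)
  (valid, science_count, humanity_count)

-- ===== PRECONDITION & SPEC =====
def Spec_validate_student (subjects : List String) (out : Bool × Int × Int) : Prop := out = validate_student_alt subjects
instance (subjects : List String) (out : Bool × Int × Int) : Decidable (Spec_validate_student subjects out) := by unfold Spec_validate_student; infer_instance

-- ===== CLAIM (what is proved, stated in full; the proofs are below) =====
def Claim_equal_validate_student : Prop := ∀ (subjects : List String), Dom_validate_student subjects → Spec_validate_student subjects (validate_student subjects)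

-- ===== LEMMAS AND PROOFS =====

theorem foldl_count_shift (p : String → Bool) (l : List String) (a : Int) :
    l.foldl (fun acc s => if p s then acc + 1 else acc) a
      = a + l.foldl (fun acc s => if p s then acc + 1 else acc) 0 := by
  induction l generalizing a with
  | nil => simp
  | cons x xs ih =>
    simp only [List.foldl_cons]
    rw [ih, ih (if p x then (0 : Int) + 1 else 0)]
    split <;> ring

theorem vsLoop_eq (l : List String) (sc hc : Int) :
    vsLoop l sc hc =
      (sc + l.foldl (fun acc s => if get_category s == "Science" then acc + 1 else acc) 0,
       hc + l.foldl (fun acc s => if get_category s == "Humanity" then acc + 1 else acc) 0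
          + l.foldl (fun acc s => if (["Language", "Arts"] : List String).contains (get_category s) then acc + 1 else acc) 0) := by
  induction l generalizing sc hc with
  | nil => simp [vsLoop]
  | cons x xs ih =>
    simp only [vsLoop, List.foldl_cons]
    rw [foldl_count_shift (fun s => get_category s == "Science") xs,
        foldl_count_shift (fun s => get_category s == "Humanity") xs,
        foldl_count_shift (fun s => (["Language", "Arts"] : List String).contains (get_category s)) xs]
    by_cases hs : get_category x == "Science"
    · have h2 : ((["Humanity", "Language", "Arts"] : List String).contains (get_category x)) = false := by
        rw [beq_iff_eq] at hs
        simp [hs]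
      have h3 : ((["Language", "Arts"] : List String).contains (get_category x)) = false := by
        rw [beq_iff_eq] at hs
        simp [hs]
      have h4 : (get_category x == "Humanity") = false := by
        rw [beq_iff_eq] at hs
        rw [hs]; decide
      simp only [hs, h2, h3, h4, if_true, if_false, Bool.false_eq_true, ih]
      simp only [Prod.mk.injEq]; exact ⟨by ring, by ring⟩
    · simp only [hs, Bool.false_eq_true, if_false, ih]
      by_cases hh : (["Humanity", "Language", "Arts"] : List String).contains (get_category x)
      · simp only [hh, if_true]
        have : (get_category x == "Humanity") = true ∨
            ((["Language", "Arts"] : List String).contains (get_category x)) = true := by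
          simp only [List.contains_cons] at hh
          rcases Bool.or_eq_true_iff.mp hh with h | h
          · left; exact h
          · right; simpa using h
        rcases this with h | h
        · have h' : ((["Language", "Arts"] : List String).contains (get_category x)) = false := by
            rw [beq_iff_eq] at h
            simp [h]
          simp only [h, h', if_true, Bool.false_eq_true, if_false]
          simp only [Prod.mk.injEq]; exact ⟨by ring, by ring⟩
        · have h' : (get_category x == "Humanity") = false := by
            simp only [List.contains_cons, List.contains_nil, Bool.or_false] at h
            rcases Bool.or_eq_true_iff.mp h with h1 | h1 <;>
              · rw [beq_iff_eq] at h1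
                rw [h1]; decide
          simp only [h, h', if_true, Bool.false_eq_true, if_false]
          simp only [Prod.mk.injEq]; exact ⟨by ring, by ring⟩
      · have h1 : (get_category x == "Humanity") = false := by
          by_contra hx
          simp only [Bool.not_eq_false, beq_iff_eq] at hx
          simp [hx] at hh
        have h2 : ((["Language", "Arts"] : List String).contains (get_category x)) = false := by
          by_contra hx
          simp only [Bool.not_eq_false] at hx
          apply hh
          simp only [List.contains_cons] at hx ⊢
          simp only [Bool.or_eq_true_iff] at hx ⊢
          tauto
        simp only [eq_false_of_ne_true hh, h1, h2, Bool.false_eq_true, if_false]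
        simp only [Prod.mk.injEq]; exact ⟨by ring, by ring⟩

-- ===== VERDICT (by name: the statement is the Claim_ definition above) =====
theorem validate_student_spec : Claim_equal_validate_student := by
  intro subjects _
  unfold Spec_validate_student validate_student validate_student_alt
  rw [vsLoop_eq]
  simp
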